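-- pv_equiv track=rewrite | github.com/luonghaianh1208/PPTmaster | skills/ppt-master/scripts/svg_to_shapes.py | parse_font_family
-- ===== SOURCE A (Python) =====
-- from typing import Optional, Tuple, List, Dict, Any
--
-- EA_FONTS = {
--     'PingFang SC', 'PingFang TC', 'PingFang HK',
--     'Microsoft YaHei', 'Microsoft JhengHei',
--     'SimSun', 'SimHei', 'FangSong', 'KaiTi', 'STKaiti',
--     'STHeiti', 'STSong', 'STFangsong', 'STXihei', 'STZhongsong',
--     'Hiragino Sans', 'Hiragino Sans GB', 'Hiragino Mincho ProN',
--     'Noto Sans SC', 'Noto Sans TC', 'Noto Serif SC', 'Noto Serif TC',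
--     'Source Han Sans SC', 'Source Han Sans TC',
--     'Source Han Serif SC', 'Source Han Serif TC',
--     'WenQuanYi Micro Hei', 'WenQuanYi Zen Hei',
--     'YouYuan', 'LiSu', 'HuaWenKaiTi',
-- }
--
-- SYSTEM_FONTS = {'system-ui', '-apple-system', 'BlinkMacSystemFont'}
--
-- def parse_font_family(font_family_str: str) -> Dict[str, str]:
--     """Parse CSS font-family to latin/ea typefaces."""
--     if not font_family_str:
--         return {'latin': 'Segoe UI', 'ea': 'Microsoft YaHei'}
--
--     fonts = [f.strip().strip("'\"") for f in font_family_str.split(',')]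
--     latin_font = None
--     ea_font = None
--
--     for font in fonts:
--         if font in SYSTEM_FONTS or font in ('sans-serif', 'serif', 'monospace'):
--             continue
--         if font in EA_FONTS:
--             ea_font = ea_font or font
--         else:
--             latin_font = latin_font or font
--
--     # If no latin font found but we have EA, use EA as latin too
--     # (PPT renders CJK text via latin typeface when ea doesn't match)
--     if not latin_font and ea_font:
--         latin_font = ea_font
--
--     return {
--         'latin': latin_font or 'Segoe UI',
--         'ea': ea_font or latin_font or 'Microsoft YaHei',
--     }
-- ===== SOURCE B (Python) =====
-- EA_FONTS = {
--     'PingFang SC', 'PingFang TC', 'PingFang HK',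
--     'Microsoft YaHei', 'Microsoft JhengHei',
--     'SimSun', 'SimHei', 'FangSong', 'KaiTi', 'STKaiti',
--     'STHeiti', 'STSong', 'STFangsong', 'STXihei', 'STZhongsong',
--     'Hiragino Sans', 'Hiragino Sans GB', 'Hiragino Mincho ProN',
--     'Noto Sans SC', 'Noto Sans TC', 'Noto Serif SC', 'Noto Serif TC',
--     'Source Han Sans SC', 'Source Han Sans TC',
--     'Source Han Serif SC', 'Source Han Serif TC',
--     'WenQuanYi Micro Hei', 'WenQuanYi Zen Hei',
--     'YouYuan', 'LiSu', 'HuaWenKaiTi',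
-- }
--
-- SYSTEM_FONTS = {'system-ui', '-apple-system', 'BlinkMacSystemFont'}
--
-- GENERIC_FONTS = {'sans-serif', 'serif', 'monospace'}
--
-- def parse_font_family(font_family_str: str):
--     """Parse CSS font-family to latin/ea typefaces (two independent first-match scans)."""
--     if not font_family_str:
--         return {'latin': 'Segoe UI', 'ea': 'Microsoft YaHei'}
--
--     fonts = [f.strip().strip("'\"") for f in font_family_str.split(',')]
--     ea = next((f for f in fonts if f in EA_FONTS), None)
--     latin = next((f for f in fonts
--                   if f and f not in EA_FONTS
--                   and f not in SYSTEM_FONTS and f not in GENERIC_FONTS), None)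
--     if latin is None:
--         latin = ea
--     return {'latin': latin or 'Segoe UI', 'ea': ea or latin or 'Microsoft YaHei'}
-- ===== Notes on version B (the rewrite author's own statement) =====
-- stated objective: simpler
-- what changed: Replaces the single accumulator loop carrying two or-updated slots with two independent first-match scans (next over a generator) for the EA font and the latin font, plus the same fallback defaults.
import Mathlib
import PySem

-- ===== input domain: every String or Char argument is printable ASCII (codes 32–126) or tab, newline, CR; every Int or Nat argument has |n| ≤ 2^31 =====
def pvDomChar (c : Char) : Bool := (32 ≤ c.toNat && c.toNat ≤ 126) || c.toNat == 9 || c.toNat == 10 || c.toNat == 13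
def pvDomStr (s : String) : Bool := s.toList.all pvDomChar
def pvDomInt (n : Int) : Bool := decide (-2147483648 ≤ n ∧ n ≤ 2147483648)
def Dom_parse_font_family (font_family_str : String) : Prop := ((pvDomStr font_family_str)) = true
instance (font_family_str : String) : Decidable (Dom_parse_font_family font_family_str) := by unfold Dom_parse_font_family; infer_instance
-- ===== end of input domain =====

-- B replaces A's single accumulator loop by two independent first-match scans (simpler decomposition); return values proved equal on all domain inputs.

-- ===== PORT A =====
def EA_FONTS : PySem.Set String := PySem.Set.ofList
  ["PingFang SC", "PingFang TC", "PingFang HK",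
   "Microsoft YaHei", "Microsoft JhengHei",
   "SimSun", "SimHei", "FangSong", "KaiTi", "STKaiti",
   "STHeiti", "STSong", "STFangsong", "STXihei", "STZhongsong",
   "Hiragino Sans", "Hiragino Sans GB", "Hiragino Mincho ProN",
   "Noto Sans SC", "Noto Sans TC", "Noto Serif SC", "Noto Serif TC",
   "Source Han Sans SC", "Source Han Sans TC",
   "Source Han Serif SC", "Source Han Serif TC",
   "WenQuanYi Micro Hei", "WenQuanYi Zen Hei",
   "YouYuan", "LiSu", "HuaWenKaiTi"]

def SYSTEM_FONTS : PySem.Set String := PySem.Set.ofList ["system-ui", "-apple-system", "BlinkMacSystemFont"]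

-- Python truthiness of an Optional[str] slot (None and '' are falsy)
def pyTruthy (o : Option String) : Bool :=
  match o with
  | none => false
  | some s => !(s == "")

-- Python 'slot or font' where slot : Optional[str]
def pyOrStr (o : Option String) (f : String) : String :=
  match o with
  | none => f
  | some s => if s == "" then f else s

-- the body of A's for-loop over fonts, state = (latin_font, ea_font)
def stepA (st : Option String × Option String) (font : String) : Option String × Option String :=
  if PySem.Set.contains SYSTEM_FONTS font || (["sans-serif", "serif", "monospace"]).contains font then st
  else if PySem.Set.contains EA_FONTS font then (st.1, some (pyOrStr st.2 font))
  else (some (pyOrStr st.1 font), st.2)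

def parse_font_family (font_family_str : String) : List (String × String) :=
  if font_family_str == "" then [("latin", "Segoe UI"), ("ea", "Microsoft YaHei")]
  else
    let fonts := (((PySem.Str.split? font_family_str ",").getD [])).map
      (fun f => PySem.Str.stripChars (PySem.Str.strip f) "'\"")
    let st := fonts.foldl stepA (none, none)
    let latin_font := st.1
    let ea_font := st.2
    let latin_font := if !pyTruthy latin_font && pyTruthy ea_font then ea_font else latin_font
    [("latin", pyOrStr latin_font "Segoe UI"),
     ("ea", pyOrStr ea_font (pyOrStr latin_font "Microsoft YaHei"))]

-- ===== PORT B =====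
def GENERIC_FONTS : PySem.Set String := PySem.Set.ofList ["sans-serif", "serif", "monospace"]

def isEA (f : String) : Bool := PySem.Set.contains EA_FONTS f

def latinOK (f : String) : Bool :=
  !(f == "") && !isEA f && !PySem.Set.contains SYSTEM_FONTS f && !PySem.Set.contains GENERIC_FONTS f

def parse_font_family_alt (font_family_str : String) : List (String × String) :=
  if font_family_str == "" then [("latin", "Segoe UI"), ("ea", "Microsoft YaHei")]
  else
    let fonts := (((PySem.Str.split? font_family_str ",").getD [])).map
      (fun f => PySem.Str.stripChars (PySem.Str.strip f) "'\"")
    let ea := fonts.find? isEA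
    let latin := fonts.find? latinOK
    let latin := if latin.isNone then ea else latin
    [("latin", latin.getD "Segoe UI"),
     ("ea", ea.getD (latin.getD "Microsoft YaHei"))]

-- ===== PRECONDITION & SPEC =====
def Spec_parse_font_family (font_family_str : String) (out : List (String × String)) : Prop := out = parse_font_family_alt font_family_str
instance (font_family_str : String) (out : List (String × String)) : Decidable (Spec_parse_font_family font_family_str out) := by unfold Spec_parse_font_family; infer_instance

-- ===== CLAIM (what is proved, stated in full; the proofs are below) =====
def Claim_equal_parse_font_family : Prop := ∀ (font_family_str : String), Dom_parse_font_family font_family_str → Spec_parse_font_family font_family_str (parse_font_family font_family_str)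

-- ===== LEMMAS AND PROOFS =====

-- truthy part of an Optional[str] slot
def truthify (o : Option String) : Option String :=
  match o with
  | none => none
  | some s => if s == "" then none else some s

theorem pyTruthy_eq (o : Option String) : pyTruthy o = (truthify o).isSome := by
  cases o with
  | none => rfl
  | some s => by_cases h : s = "" <;> simp [pyTruthy, truthify, h]

theorem pyOrStr_eq (o : Option String) (d : String) : pyOrStr o d = (truthify o).getD d := by
  cases o with
  | none => rfl
  | some s => by_cases h : s = "" <;> simp [pyOrStr, truthify, h]

theorem truthify_some (f : String) (h : (f == "") = false) : truthify (some f) = some f := by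
  simp [truthify, h]

theorem pyOrStr_falsy (o : Option String) (f : String) (h : (truthify o).isSome = false) :
    pyOrStr o f = f := by
  have hn : truthify o = none := Option.not_isSome_iff_eq_none.mp (by simp [h])
  rw [pyOrStr_eq, hn, Option.getD_none]

theorem truthy_absorb (o : Option String) (f : String) (h : (truthify o).isSome = true) :
    some (pyOrStr o f) = o := by
  cases o with
  | none => simp [truthify] at h
  | some s =>
    by_cases hs : (s == "") = true
    · simp [truthify, hs] at h
    · simp [pyOrStr, hs]

-- the three shapes of one loop step
theorem stepA_skip (st : Option String × Option String) (f : String)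
    (h : (PySem.Set.contains SYSTEM_FONTS f || (["sans-serif", "serif", "monospace"]).contains f) = true) :
    stepA st f = st := by
  unfold stepA; rw [if_pos h]

theorem stepA_ea (st : Option String × Option String) (f : String)
    (h1 : ¬ (PySem.Set.contains SYSTEM_FONTS f || (["sans-serif", "serif", "monospace"]).contains f) = true)
    (h2 : PySem.Set.contains EA_FONTS f = true) :
    stepA st f = (st.1, some (pyOrStr st.2 f)) := by
  unfold stepA; rw [if_neg h1, if_pos h2]

theorem stepA_latin (st : Option String × Option String) (f : String)
    (h1 : ¬ (PySem.Set.contains SYSTEM_FONTS f || (["sans-serif", "serif", "monospace"]).contains f) = true)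
    (h2 : ¬ PySem.Set.contains EA_FONTS f = true) :
    stepA st f = (some (pyOrStr st.1 f), st.2) := by
  unfold stepA; rw [if_neg h1, if_neg h2]

theorem generic_contains (f : String) :
    (["sans-serif", "serif", "monospace"] : List String).contains f = PySem.Set.contains GENERIC_FONTS f := by
  rfl

theorem ea_nonempty (f : String) (h : PySem.Set.contains EA_FONTS f = true) : (f == "") = false := by
  have hm : f ∈ (["PingFang SC", "PingFang TC", "PingFang HK",
   "Microsoft YaHei", "Microsoft JhengHei",
   "SimSun", "SimHei", "FangSong", "KaiTi", "STKaiti",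
   "STHeiti", "STSong", "STFangsong", "STXihei", "STZhongsong",
   "Hiragino Sans", "Hiragino Sans GB", "Hiragino Mincho ProN",
   "Noto Sans SC", "Noto Sans TC", "Noto Serif SC", "Noto Serif TC",
   "Source Han Sans SC", "Source Han Sans TC",
   "Source Han Serif SC", "Source Han Serif TC",
   "WenQuanYi Micro Hei", "WenQuanYi Zen Hei",
   "YouYuan", "LiSu", "HuaWenKaiTi"] : List String) := by
    have h2 : f ∈ (EA_FONTS : List String) := by simpa using h
    simpa [EA_FONTS, PySem.Set.mem_ofList] using h2
  fin_cases hm <;> decide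

theorem skip_not_ea (f : String)
    (h : (PySem.Set.contains SYSTEM_FONTS f || (["sans-serif", "serif", "monospace"]).contains f) = true) :
    isEA f = false := by
  have hm : f ∈ (["system-ui", "-apple-system", "BlinkMacSystemFont",
                  "sans-serif", "serif", "monospace"] : List String) := by
    rcases Bool.or_eq_true_iff.mp h with h1 | h1
    · have h2 : f ∈ (SYSTEM_FONTS : List String) := by simpa using h1
      have h3 : f ∈ (["system-ui", "-apple-system", "BlinkMacSystemFont"] : List String) := by
        simpa [SYSTEM_FONTS, PySem.Set.mem_ofList] using h2
      simp only [List.mem_cons] at h3 ⊢; tauto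
    · have h3 : f ∈ (["sans-serif", "serif", "monospace"] : List String) := by simpa using h1
      simp only [List.mem_cons] at h3 ⊢; tauto
  fin_cases hm <;> decide

-- absorbing: a truthy ea slot is never changed by the loop
theorem fold_ea_absorb (fonts : List String) (st : Option String × Option String)
    (h : (truthify st.2).isSome = true) : (fonts.foldl stepA st).2 = st.2 := by
  induction fonts generalizing st with
  | nil => rfl
  | cons f rest ih =>
    simp only [List.foldl_cons]
    have hstep : (stepA st f).2 = st.2 := by
      by_cases h1 : (PySem.Set.contains SYSTEM_FONTS f || (["sans-serif", "serif", "monospace"]).contains f) = true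
      · rw [stepA_skip st f h1]
      · by_cases h2 : PySem.Set.contains EA_FONTS f = true
        · rw [stepA_ea st f h1 h2]; exact truthy_absorb st.2 f h
        · rw [stepA_latin st f h1 h2]
    rw [show stepA st f = ((stepA st f).1, st.2) from by rw [← hstep]]
    exact ih _ (by simpa using h)

-- from a falsy ea slot, the loop's ea slot is the first EA font
theorem fold_ea (fonts : List String) (st : Option String × Option String)
    (h : (truthify st.2).isSome = false) :
    truthify (fonts.foldl stepA st).2 = fonts.find? isEA := by
  induction fonts generalizing st with
  | nil =>
    cases h2 : st.2 with
    | none => simp [h2, truthify]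
    | some s =>
      have hs : (s == "") = true := by
        by_contra hne
        rw [h2, truthify_some s (by simpa using hne)] at h; simp at h
      simp [h2, truthify, hs]
  | cons f rest ih =>
    simp only [List.foldl_cons]
    by_cases hskip : (PySem.Set.contains SYSTEM_FONTS f || (["sans-serif", "serif", "monospace"]).contains f) = true
    · rw [stepA_skip st f hskip, List.find?_cons_of_neg (by simp [skip_not_ea f hskip])]
      exact ih st h
    · by_cases hea : PySem.Set.contains EA_FONTS f = true
      · have hne := ea_nonempty f hea
        rw [stepA_ea st f hskip hea, pyOrStr_falsy st.2 f h,
            List.find?_cons_of_pos (by simpa [isEA] using hea),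
            fold_ea_absorb rest _ (by simp [truthify_some f hne])]
        exact truthify_some f hne
      · rw [stepA_latin st f hskip hea,
            List.find?_cons_of_neg (by unfold isEA; exact hea)]
        exact ih _ (by simpa using h)

-- absorbing: a truthy latin slot is never changed by the loop
theorem fold_latin_absorb (fonts : List String) (st : Option String × Option String)
    (h : (truthify st.1).isSome = true) : (fonts.foldl stepA st).1 = st.1 := by
  induction fonts generalizing st with
  | nil => rfl
  | cons f rest ih =>
    simp only [List.foldl_cons]
    have hstep : (stepA st f).1 = st.1 := by
      by_cases h1 : (PySem.Set.contains SYSTEM_FONTS f || (["sans-serif", "serif", "monospace"]).contains f) = true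
      · rw [stepA_skip st f h1]
      · by_cases h2 : PySem.Set.contains EA_FONTS f = true
        · rw [stepA_ea st f h1 h2]
        · rw [stepA_latin st f h1 h2]; exact truthy_absorb st.1 f h
    rw [show stepA st f = (st.1, (stepA st f).2) from by rw [← hstep]]
    exact ih _ (by simpa using h)

-- from a falsy latin slot, the loop's latin slot (truthified) is the first latin-eligible font
theorem fold_latin (fonts : List String) (st : Option String × Option String)
    (h : (truthify st.1).isSome = false) :
    truthify (fonts.foldl stepA st).1 = fonts.find? latinOK := by
  induction fonts generalizing st with
  | nil =>
    cases h1 : st.1 with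
    | none => simp [h1, truthify]
    | some s =>
      have hs : (s == "") = true := by
        by_contra hne
        rw [h1, truthify_some s (by simpa using hne)] at h; simp at h
      simp [h1, truthify, hs]
  | cons f rest ih =>
    simp only [List.foldl_cons]
    by_cases hskip : (PySem.Set.contains SYSTEM_FONTS f || (["sans-serif", "serif", "monospace"]).contains f) = true
    · have hok : latinOK f = false := by
        rcases Bool.or_eq_true_iff.mp hskip with h1 | h1
        · have h1' : f ∈ (SYSTEM_FONTS : List String) := by simpa using h1
          simp [latinOK, h1']
        · rw [generic_contains] at h1
          have h1' : f ∈ (GENERIC_FONTS : List String) := by simpa using h1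
          simp [latinOK, h1']
      rw [stepA_skip st f hskip, List.find?_cons_of_neg (by simp [hok])]
      exact ih st h
    · by_cases hea : PySem.Set.contains EA_FONTS f = true
      · have hok : latinOK f = false := by
          have hm : f ∈ (EA_FONTS : List String) := by simpa using hea
          simp [latinOK, isEA, hm]
        rw [stepA_ea st f hskip hea, List.find?_cons_of_neg (by simp [hok])]
        exact ih _ (by simpa using h)
      · rw [stepA_latin st f hskip hea, pyOrStr_falsy st.1 f h]
        by_cases hfe : (f == "") = true
        · have hok : latinOK f = false := by
            have hfe0 : f = "" := by simpa using hfe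
            simp [latinOK, hfe0]
          rw [List.find?_cons_of_neg (by simp [hok])]
          exact ih _ (by simp [truthify, hfe])
        · have hfe' : (f == "") = false := by simpa using hfe
          have hok : latinOK f = true := by
            have hsys : f ∉ (SYSTEM_FONTS : List String) := by
              intro hx
              exact hskip (by simp only [Bool.or_eq_true_iff]; left; simpa using hx)
            have hgen : f ∉ (GENERIC_FONTS : List String) := by
              intro hx
              refine hskip (by simp only [Bool.or_eq_true_iff]; right; rw [generic_contains]; simpa using hx)
            have heam : f ∉ (EA_FONTS : List String) := by
              intro hx; exact hea (by simpa using hx)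
            have hfe0 : ¬ f = "" := by simpa using hfe
            simp [latinOK, isEA, hfe0, hsys, hgen, heam]
          rw [List.find?_cons_of_pos hok,
              fold_latin_absorb rest _ (by simp [truthify_some f hfe'])]
          exact truthify_some f hfe'

-- the whole body, for an arbitrary parsed font list
theorem body_eq (fonts : List String) :
    (let st := fonts.foldl stepA ((none : Option String), (none : Option String))
     let latin_font := st.1
     let ea_font := st.2
     let latin_font := if !pyTruthy latin_font && pyTruthy ea_font then ea_font else latin_font
     ([("latin", pyOrStr latin_font "Segoe UI"),
       ("ea", pyOrStr ea_font (pyOrStr latin_font "Microsoft YaHei"))] : List (String × String))) =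
    (let ea := fonts.find? isEA
     let latin := fonts.find? latinOK
     let latin := if latin.isNone then ea else latin
     [("latin", latin.getD "Segoe UI"),
      ("ea", ea.getD (latin.getD "Microsoft YaHei"))]) := by
  have hea := fold_ea fonts (none, none) (by simp [truthify])
  have hlat := fold_latin fonts (none, none) (by simp [truthify])
  simp only [← hea, ← hlat, pyTruthy_eq, pyOrStr_eq]
  cases h1 : truthify (fonts.foldl stepA (none, none)).1 <;>
    cases h2 : truthify (fonts.foldl stepA (none, none)).2 <;>
      simp [h1, h2]

-- ===== VERDICT (by name: the statement is the Claim_ definition above) =====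
theorem parse_font_family_spec : Claim_equal_parse_font_family := by
  intro s _hdom
  unfold Spec_parse_font_family parse_font_family parse_font_family_alt
  by_cases hs : (s == "") = true
  · rw [if_pos hs, if_pos hs]
  · rw [if_neg hs, if_neg hs]
    exact body_eq _
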